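-- pv_equiv track=rewrite | github.com/Moana63/Algogo | Moana_code_propre/proba_minimizers.py | frequency_minimizer
-- ===== SOURCE A (Python) =====
-- from collections import Counter
--
-- def frequency_minimizer(read: str, seed_size: int, len_window: int = 10) -> dict:
--     """Returns the frequency of minimisers per read
--
--     Parameters
--     ----------
--     read : str
--         a DNA read
--     seed_size : int
--         size of the minimiser
--     len_window : int, optional
--         length of the window sliding on the sequence, by default 10
--
--     Returns
--     -------
--     dict
--         a dictionnary containing the minimisers encountered in the sequence as key and their number of occurences as values
--     """
--     list_minimisers = list()
--     i = 0
--     while i < (len(read)-len_window+1):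
--         minimiser = min([(read[i+j: i+j+seed_size], j)
--                         for j in range(len_window-seed_size+1)])
--         list_minimisers.append(minimiser[0])
--         # we jump to the next window not containing the last minimiser encountered, to reduce computation time
--         i += minimiser[1] + 1
--     return Counter(list_minimisers)
-- ===== SOURCE B (Python) =====
-- from collections import deque
--
-- def frequency_minimizer(read: str, seed_size: int, len_window: int = 10) -> dict:
--     """Frequency of jumped-window minimisers via a monotone deque.
--
--     Instead of rescanning every window from scratch, keep a deque of
--     candidate (position, k-mer) pairs with increasing positions and
--     non-decreasing k-mers: stale positions are popped from the front,
--     each new position pops dominated candidates from the back, and the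
--     front of the deque is always the leftmost minimal k-mer of the
--     current window.  Each position is pushed/popped at most once."""
--     counts = {}
--     n = len(read)
--     span = len_window - seed_size + 1
--     limit = n - len_window + 1
--     dq = deque()
--     i = 0
--     nxt = 0  # first position not yet offered to the deque
--     while i < limit:
--         end = i + span
--         while dq and dq[0][0] < i:
--             dq.popleft()
--         while nxt < end:
--             km = read[nxt:nxt + seed_size]
--             while dq and dq[-1][1] > km:
--                 dq.pop()
--             dq.append((nxt, km))
--             nxt += 1
--         p, m = dq[0]
--         counts[m] = counts.get(m, 0) + 1
--         i = p + 1
--     return counts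
-- ===== Notes on version B (the rewrite author's own statement) =====
-- stated objective: faster
-- what changed: B maintains a monotone deque of candidate (position, k-mer) pairs across the jumping windows (stale positions popped from the front, dominated candidates popped from the back, front = leftmost minimal k-mer), counting straight into a dict, instead of rebuilding a (k-mer, offset) tuple list and calling min() for every window and running Counter at the end.
import Mathlib
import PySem

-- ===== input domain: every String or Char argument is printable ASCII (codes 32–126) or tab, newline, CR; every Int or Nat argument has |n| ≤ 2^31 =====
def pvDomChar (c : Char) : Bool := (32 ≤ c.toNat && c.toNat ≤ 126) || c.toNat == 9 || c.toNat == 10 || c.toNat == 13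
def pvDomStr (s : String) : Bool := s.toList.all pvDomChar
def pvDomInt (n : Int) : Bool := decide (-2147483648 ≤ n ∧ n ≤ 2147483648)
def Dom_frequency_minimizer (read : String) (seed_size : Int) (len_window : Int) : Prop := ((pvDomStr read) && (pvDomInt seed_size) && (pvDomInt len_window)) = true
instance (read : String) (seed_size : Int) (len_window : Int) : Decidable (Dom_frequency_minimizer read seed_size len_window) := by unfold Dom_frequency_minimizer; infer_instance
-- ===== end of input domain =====

-- B replaces A's per-window rescan (min over a freshly built list of (k-mer, offset) tuples)
-- by a monotone deque of candidate (position, k-mer) pairs maintained across the jumps, so each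
-- position is pushed and popped at most once (objective: faster; mechanism: the inner window
-- scan disappears).

-- ===== PORT A =====
-- Python's min over a nonempty list of (str, int) tuples: fold keeping the current best,
-- replacing it when the new tuple is strictly lex-smaller (ported by hand: exact for
-- Python tuple comparison on (str, int)).
def pyMinPair : (String × Int) → List (String × Int) → (String × Int)
  | b, [] => b
  | b, x :: t => pyMinPair (if x.1 < b.1 ∨ (x.1 = b.1 ∧ x.2 < b.2) then x else b) t

-- the while loop: i advances by minimiser offset + 1 each pass; fuel = read.length + |len_window| + 1
-- bounds the iteration count: i starts at 0 and strictly increases, while i < len(read)-len_window+1.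
def loopA (read : String) (seed_size : Int) (len_window : Int) :
    Nat → Int → List String → List String
  | 0, _, acc => acc
  | fuel + 1, i, acc =>
    if i < PySem.Str.len read - len_window + 1 then
      match (PySem.List.pyRange 0 (len_window - seed_size + 1) 1).map
          (fun j => (PySem.Str.slice read (some (i + j)) (some (i + j + seed_size)), j)) with
      | [] => acc   -- Python: min([]) raises ValueError here; excluded by Pre_
      | x :: t =>
        let m := pyMinPair x t
        loopA read seed_size len_window fuel (i + m.2 + 1) (acc ++ [m.1])
    else acc

def frequency_minimizer (read : String) (seed_size : Int) (len_window : Int) : List (String × Int) :=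
  (PySem.Dict.counter (loopA read seed_size len_window (read.toList.length + len_window.natAbs + 1) 0 [])).items

-- ===== PORT B =====
-- 'while dq and dq[-1][1] > km: dq.pop()' then 'dq.append((p, km))' (back of the deque = end of the list)
def pushBack (km : String) (p : Int) (dq : List (Int × String)) : List (Int × String) :=
  (dq.reverse.dropWhile (fun x => decide (km < x.2))).reverse ++ [(p, km)]

-- B's while loop: state = (i, nxt = first position not yet offered to the deque, deque, counts)
def loopB (read : String) (seed_size : Int) (len_window : Int) :
    Nat → Int → Int → List (Int × String) → PySem.Dict String Int → PySem.Dict String Int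
  | 0, _, _, _, d => d
  | fuel + 1, i, nxt, dq, d =>
    if i < PySem.Str.len read - len_window + 1 then
      let endw := i + (len_window - seed_size + 1)
      let dq1 := dq.dropWhile (fun x => decide (x.1 < i))
      let dq2 := (PySem.List.pyRange nxt endw 1).foldl
        (fun q p => pushBack (PySem.Str.slice read (some p) (some (p + seed_size))) p q) dq1
      let nxt2 := if nxt < endw then endw else nxt
      match dq2 with
      | [] => d   -- Python: dq[0] raises IndexError here; excluded by Pre_
      | (p, m) :: _ => loopB read seed_size len_window fuel (p + 1) nxt2 dq2 (d.insert m (d.getD m 0 + 1))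
    else d

def frequency_minimizer_alt (read : String) (seed_size : Int) (len_window : Int) : List (String × Int) :=
  (loopB read seed_size len_window (read.toList.length + len_window.natAbs + 1) 0 0 [] PySem.Dict.empty).items

-- ===== PRECONDITION & SPEC =====
-- Pre_ excludes exactly the inputs where A raises ValueError (min of an empty window list:
-- seed_size > len_window while the window loop is entered, i.e. len_window ≤ len(read));
-- B raises IndexError (dq[0] of an empty deque) on the same inputs.
def Pre_frequency_minimizer (read : String) (seed_size : Int) (len_window : Int) : Prop :=
  seed_size ≤ len_window ∨ PySem.Str.len read < len_window
instance (read : String) (seed_size : Int) (len_window : Int) : Decidable (Pre_frequency_minimizer read seed_size len_window) := by unfold Pre_frequency_minimizer; infer_instance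

def pvWitness_frequency_minimizer : String × Int × Int := ("ACGTACGTAC", 3, 5)

def Spec_frequency_minimizer (read : String) (seed_size : Int) (len_window : Int) (out : List (String × Int)) : Prop := out = frequency_minimizer_alt read seed_size len_window
instance (read : String) (seed_size : Int) (len_window : Int) (out : List (String × Int)) : Decidable (Spec_frequency_minimizer read seed_size len_window out) := by unfold Spec_frequency_minimizer; infer_instance

-- ===== CLAIM (what is proved, stated in full; the proofs are below) =====
def Claim_equal_frequency_minimizer : Prop := ∀ (read : String) (seed_size : Int) (len_window : Int), Dom_frequency_minimizer read seed_size len_window → Pre_frequency_minimizer read seed_size len_window → Spec_frequency_minimizer read seed_size len_window (frequency_minimizer read seed_size len_window)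

-- ===== LEMMAS AND PROOFS =====

-- the k-mer starting at position p (what both Pythons slice out of the read)
def kmerAt (read : String) (s p : Int) : String := PySem.Str.slice read (some p) (some (p + s))

-- specification of the deque contents: the positions p of [lo, hi) whose k-mer is ≤ every
-- later k-mer of [lo, hi), paired with their k-mers, in increasing position order
def mdeq (k : Int → String) (lo hi : Int) : List (Int × String) :=
  ((PySem.List.pyRange lo hi 1).filter
      (fun p => (PySem.List.pyRange (p + 1) hi 1).all (fun r => decide (k p ≤ k r)))).map
    (fun p => (p, k p))

theorem mem_mdeq_bounds (k : Int → String) (lo hi : Int) (x : Int × String)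
    (h : x ∈ mdeq k lo hi) : lo ≤ x.1 ∧ x.1 < hi := by
  unfold mdeq at h
  obtain ⟨p, hp, rfl⟩ := List.mem_map.mp h
  exact PySem.List.mem_pyRange_one.mp (List.mem_filter.mp hp).1

theorem mdeq_pairwise_lt (k : Int → String) (lo hi : Int) :
    (mdeq k lo hi).Pairwise (fun x y => x.1 < y.1) := by
  unfold mdeq
  rw [List.pairwise_map]
  exact List.Pairwise.sublist List.filter_sublist (PySem.List.pairwise_lt_pyRange_one lo hi)

theorem mdeq_pairwise_le (k : Int → String) (lo hi : Int) :
    (mdeq k lo hi).Pairwise (fun x y => x.2 ≤ y.2) := by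
  unfold mdeq
  rw [List.pairwise_map]
  have hpw : (List.filter (fun p => (PySem.List.pyRange (p + 1) hi 1).all (fun r => decide (k p ≤ k r))) (PySem.List.pyRange lo hi 1)).Pairwise (· < ·) :=
    List.Pairwise.sublist List.filter_sublist (PySem.List.pairwise_lt_pyRange_one lo hi)
  refine hpw.imp_of_mem ?_
  intro p q hp hq hlt
  have hcond := (List.mem_filter.mp hp).2
  have hqr := PySem.List.mem_pyRange_one.mp (List.mem_filter.mp hq).1
  have := List.all_eq_true.mp hcond q (PySem.List.mem_pyRange_one.mpr ⟨by omega, hqr.2⟩)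
  exact of_decide_eq_true this

theorem dropWhile_eq_filter_of_pw {α : Type} (p : α → Bool) :
    ∀ l : List α, l.Pairwise (fun a b => p b = true → p a = true) →
      l.dropWhile p = l.filter (fun x => !p x) := by
  intro l
  induction l with
  | nil => intro _; rfl
  | cons a t ih =>
    intro hpw
    obtain ⟨h1, h2⟩ := List.pairwise_cons.mp hpw
    cases hp : p a with
    | true =>
      rw [List.dropWhile_cons_of_pos hp, List.filter_cons_of_neg (by simp [hp]), ih h2]
    | false =>
      rw [List.dropWhile_cons_of_neg (by simp [hp]), List.filter_cons_of_pos (by simp [hp]),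
        List.filter_eq_self.mpr]
      intro x hx
      cases hpx : p x with
      | true => exact absurd (h1 x hx hpx) (by simp [hp])
      | false => simp

theorem mdeq_snoc (k : Int → String) (lo hi : Int) (h : lo ≤ hi) :
    mdeq k lo (hi + 1) =
      (mdeq k lo hi).filter (fun x => !decide (k hi < x.2)) ++ [(hi, k hi)] := by
  unfold mdeq
  rw [PySem.List.pyRange_one_succ_right h, List.filter_append, List.map_append, List.filter_map,
    List.filter_filter]
  have hsing : List.filter (fun p => (PySem.List.pyRange (p + 1) (hi+1) 1).all (fun r => decide (k p ≤ k r))) [hi] = [hi] := by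
    rw [List.filter_cons_of_pos]
    · rfl
    · simp [PySem.List.pyRange_one_eq_nil (by omega : hi + 1 ≤ hi + 1)]
  rw [hsing]
  congr 1
  rw [List.filter_congr]
  intro p hp
  have hpb := PySem.List.mem_pyRange_one.mp hp
  rw [PySem.List.pyRange_one_append (p+1) hi (hi+1) (by omega) (by omega), List.all_append]
  simp only [Function.comp]
  have : (PySem.List.pyRange hi (hi+1) 1).all (fun r => decide (k p ≤ k r)) = decide (k p ≤ k hi) := by
    rw [PySem.List.pyRange_one_singleton]
    simp
  rw [this]
  have : (!decide (k hi < k p)) = decide (k p ≤ k hi) := by simp [← decide_not, not_lt]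
  rw [this, Bool.and_comm]

theorem pushBack_mdeq (k : Int → String) (lo hi : Int) (h : lo ≤ hi) :
    pushBack (k hi) hi (mdeq k lo hi) = mdeq k lo (hi + 1) := by
  unfold pushBack
  rw [mdeq_snoc k lo hi h]
  congr 1
  have hpw : (mdeq k lo hi).reverse.Pairwise (fun a b => decide (k hi < b.2) = true → decide (k hi < a.2) = true) := by
    rw [List.pairwise_reverse]
    refine (mdeq_pairwise_le k lo hi).imp ?_
    intro a b hab h1
    have := of_decide_eq_true h1
    exact decide_eq_true (lt_of_lt_of_le this hab)
  rw [dropWhile_eq_filter_of_pw _ _ hpw, ← List.filter_reverse, List.reverse_reverse]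

theorem pushRange_mdeq (k : Int → String) (lo a : Int) (hla : lo ≤ a) :
    ∀ b : Int, a ≤ b →
      (PySem.List.pyRange a b 1).foldl (fun q p => pushBack (k p) p q) (mdeq k lo a) =
        mdeq k lo b := by
  intro b hb
  induction b, hb using Int.le_induction with
  | base => rw [PySem.List.pyRange_one_eq_nil (le_refl a)]; rfl
  | succ n hn ih =>
    rw [PySem.List.pyRange_one_succ_right hn, List.foldl_append, ih, List.foldl_cons,
      List.foldl_nil, pushBack_mdeq k lo n (le_trans hla hn)]

theorem filter_range_ge (lo hi i : Int) (h : lo ≤ i) :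
    (PySem.List.pyRange lo hi 1).filter (fun p => !decide (p < i)) = PySem.List.pyRange i hi 1 := by
  by_cases hcase : hi ≤ i
  · rw [PySem.List.pyRange_one_eq_nil hcase, List.filter_eq_nil_iff.mpr]
    intro p hp
    have := PySem.List.mem_pyRange_one.mp hp
    simp; omega
  · rw [PySem.List.pyRange_one_append lo i hi h (by omega), List.filter_append,
      List.filter_eq_nil_iff.mpr, List.filter_eq_self.mpr, List.nil_append]
    · intro p hp
      have := PySem.List.mem_pyRange_one.mp hp
      simp; omega
    · intro p hp
      have := PySem.List.mem_pyRange_one.mp hp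
      simp; omega

theorem popFront_mdeq (k : Int → String) (lo hi i : Int) (h : lo ≤ i) :
    (mdeq k lo hi).dropWhile (fun x => decide (x.1 < i)) = mdeq k i hi := by
  have hpw : (mdeq k lo hi).Pairwise (fun a b => decide (b.1 < i) = true → decide (a.1 < i) = true) := by
    refine (mdeq_pairwise_lt k lo hi).imp ?_
    intro a b hab h1
    exact decide_eq_true (lt_trans hab (of_decide_eq_true h1))
  rw [dropWhile_eq_filter_of_pw _ _ hpw]
  unfold mdeq
  rw [List.filter_map]
  simp only [Function.comp_def]
  rw [List.filter_comm, filter_range_ge lo hi i h]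

theorem head_mdeq (k : Int → String) (i : Int) :
    ∀ hi : Int, i + 1 ≤ hi →
      ∃ t, mdeq k i hi =
        (i + ((PySem.List.pyRange 1 (hi - i) 1).foldl
                (fun (b : String × Int) j => if k (i + j) < b.1 then (k (i + j), j) else b)
                (k i, 0)).2,
         ((PySem.List.pyRange 1 (hi - i) 1).foldl
                (fun (b : String × Int) j => if k (i + j) < b.1 then (k (i + j), j) else b)
                (k i, 0)).1) :: t := by
  intro hi hhi
  induction hi, hhi using Int.le_induction with
  | base =>
    refine ⟨[], ?_⟩
    have e1 : i + 1 - i = 1 := by ring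
    rw [e1, PySem.List.pyRange_one_eq_nil (le_refl 1)]
    unfold mdeq
    rw [PySem.List.pyRange_one_singleton, List.filter_cons_of_pos
      (by simp [PySem.List.pyRange_one_eq_nil (le_refl (i+1))])]
    simp
  | succ hi hge ih =>
    obtain ⟨t, ht⟩ := ih
    have e1 : hi + 1 - i = (hi - i) + 1 := by ring
    have e2 : i + (hi - i) = hi := by ring
    rw [e1, PySem.List.pyRange_one_succ_right (by omega : (1:Int) ≤ hi - i), List.foldl_append,
      List.foldl_cons, List.foldl_nil, e2]
    set F := (PySem.List.pyRange 1 (hi - i) 1).foldl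
                (fun (b : String × Int) j => if k (i + j) < b.1 then (k (i + j), j) else b)
                (k i, 0) with hF
    rw [mdeq_snoc k i hi (by omega), ht]
    by_cases hlt : k hi < F.1
    · refine ⟨[], ?_⟩
      rw [if_pos hlt]
      rw [List.filter_eq_nil_iff.mpr, List.nil_append]
      · simp [e2]
      · intro x hx
        have hle : F.1 ≤ x.2 := by
          have hpw := mdeq_pairwise_le k i hi
          rw [ht] at hpw
          rcases List.mem_cons.mp hx with rfl | hx'
          · exact le_refl _
          · exact (List.pairwise_cons.mp hpw).1 x hx'
        simp only [Bool.not_eq_eq_eq_not, Bool.not_true, decide_eq_false_iff_not, not_not]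
        exact lt_of_lt_of_le hlt hle
    · refine ⟨List.filter (fun x => !decide (k hi < x.2)) t ++ [(hi, k hi)], ?_⟩
      rw [if_neg hlt, List.filter_cons_of_pos (by simpa using hlt), List.cons_append]

theorem minPair_eq_foldl (k : Int → String) :
    ∀ (js : List Int) (b : String × Int), (∀ j ∈ js, b.2 < j) → js.Pairwise (· < ·) →
      pyMinPair b (js.map (fun j => (k j, j))) =
        js.foldl (fun (b : String × Int) j => if k j < b.1 then (k j, j) else b) b := by
  intro js
  induction js with
  | nil => intro b _ _; rfl
  | cons j rest ih =>
    intro b hlt hpw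
    have hbj : b.2 < j := hlt j (List.mem_cons_self ..)
    have hcond : (k j < b.1 ∨ (k j = b.1 ∧ j < b.2)) ↔ k j < b.1 := by
      constructor
      · rintro (h | ⟨_, h⟩)
        · exact h
        · exfalso; omega
      · exact Or.inl
    simp only [List.map_cons, pyMinPair, List.foldl_cons]
    rw [if_congr hcond rfl rfl]
    have hrest : ∀ r ∈ rest, j < r := fun r hr => (List.pairwise_cons.mp hpw).1 r hr
    by_cases hk : k j < b.1
    · rw [if_pos hk]
      exact ih (k j, j) (fun r hr => hrest r hr) (List.pairwise_cons.mp hpw).2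
    · rw [if_neg hk]
      exact ih b (fun r hr => lt_trans hbj (hrest r hr)) (List.pairwise_cons.mp hpw).2

theorem loopA_acc (read : String) (seed_size len_window : Int) :
    ∀ (fuel : Nat) (i : Int) (acc : List String),
      loopA read seed_size len_window fuel i acc =
        acc ++ loopA read seed_size len_window fuel i [] := by
  intro fuel
  induction fuel with
  | zero => intro i acc; simp [loopA]
  | succ f ih =>
    intro i acc
    simp only [loopA]
    split
    · split
      · simp
      · rw [ih _ (acc ++ _), ih _ ([] ++ _)]
        simp
    · simp

theorem loopB_eq (read : String) (seed_size len_window : Int)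
    (hspan : seed_size ≤ len_window) :
    ∀ (fuel : Nat) (i nxt lo : Int) (d : PySem.Dict String Int),
      lo ≤ i → i ≤ nxt → nxt < i + (len_window - seed_size + 1) →
      loopB read seed_size len_window fuel i nxt (mdeq (kmerAt read seed_size) lo nxt) d =
        (loopA read seed_size len_window fuel i []).foldl
          (fun d s => d.insert s (d.getD s 0 + 1)) d := by
  intro fuel
  induction fuel with
  | zero => intro i nxt lo d _ _ _; simp [loopA, loopB]
  | succ f ih =>
    intro i nxt lo d h1 h2 h3
    simp only [loopA, loopB]
    by_cases hc : i < PySem.Str.len read - len_window + 1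
    · rw [if_pos hc, if_pos hc]
      have h01 : (0 : Int) < len_window - seed_size + 1 := by omega
      -- B side: deque = mdeq k i endw
      rw [popFront_mdeq (kmerAt read seed_size) lo nxt i h1]
      have hpush := pushRange_mdeq (kmerAt read seed_size) i nxt h2
        (i + (len_window - seed_size + 1)) (by omega)
      simp only [kmerAt] at hpush
      rw [hpush]
      -- head of the deque, in A's fold shape
      obtain ⟨t, ht⟩ := head_mdeq (kmerAt read seed_size) i (i + (len_window - seed_size + 1)) (by omega)
      have e : i + (len_window - seed_size + 1) - i = len_window - seed_size + 1 := by ring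
      rw [e] at ht
      simp only [kmerAt] at ht
      -- A side: the window min as the same fold
      have hmin :
          pyMinPair (PySem.Str.slice read (some i) (some (i + seed_size)), 0)
              ((PySem.List.pyRange 1 (len_window - seed_size + 1) 1).map
                (fun j => (PySem.Str.slice read (some (i + j)) (some (i + j + seed_size)), j))) =
            (PySem.List.pyRange 1 (len_window - seed_size + 1) 1).foldl
              (fun (b : String × Int) j =>
                if PySem.Str.slice read (some (i + j)) (some (i + j + seed_size)) < b.1
                then (PySem.Str.slice read (some (i + j)) (some (i + j + seed_size)), j) else b)
              (PySem.Str.slice read (some i) (some (i + seed_size)), 0) := by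
        simpa using minPair_eq_foldl
          (fun j => PySem.Str.slice read (some (i + j)) (some (i + j + seed_size)))
          (PySem.List.pyRange 1 (len_window - seed_size + 1) 1)
          (PySem.Str.slice read (some i) (some (i + seed_size)), 0)
          (fun j hj => (PySem.List.mem_pyRange_one.mp hj).1)
          (PySem.List.pairwise_lt_pyRange_one _ _)
      rw [PySem.List.pyRange_one_cons h01]
      simp only [List.map_cons, add_zero, zero_add]
      rw [hmin, ht]
      dsimp only
      -- bounds on the minimiser offset
      have hmem := mem_mdeq_bounds (kmerAt read seed_size) i (i + (len_window - seed_size + 1)) _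
        (by rw [ht]; exact List.mem_cons_self ..)
      obtain ⟨hm1, hm2⟩ := hmem
      rw [if_pos (by omega : nxt < i + (len_window - seed_size + 1))]
      rw [← ht, loopA_acc, List.nil_append, List.singleton_append, List.foldl_cons]
      refine ih _ _ i _ ?_ ?_ ?_ <;> omega
    · rw [if_neg hc, if_neg hc]
      rfl

-- ===== VERDICT (by name: the statement is the Claim_ definition above) =====
theorem frequency_minimizer_spec : Claim_equal_frequency_minimizer := by
  intro read seed_size len_window _ hpre
  unfold Spec_frequency_minimizer frequency_minimizer frequency_minimizer_alt
  rcases hpre with h | h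
  · have h0 : mdeq (kmerAt read seed_size) 0 0 = [] := by
      simp [mdeq, PySem.List.pyRange_one_eq_nil (le_refl 0)]
    rw [← h0, loopB_eq read seed_size len_window h _ 0 0 0 _ (le_refl 0) (le_refl 0) (by omega),
        PySem.Dict.foldl_insert_getD_add_one_eq_counter]
  · have hlen : PySem.Str.len read = (read.toList.length : Int) := by simp
    cases hfu : read.toList.length + len_window.natAbs + 1 with
    | zero => simp at hfu
    | succ f =>
      simp only [loopA, loopB]
      rw [if_neg (by omega), if_neg (by omega)]
      rfl
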